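-- pv_equiv track=rewrite | github.com/fsabiu/BioASQ2020 | task_factoid/functions_factoid.py | merge_answer
-- ===== SOURCE A (Python) =====
-- from itertools import groupby
-- from operator import itemgetter
-- import itertools
--
-- def merge_answer(predicted):
--     # Fa il merge delle risposte per la singola domanda, e restituisce le migliori 5
--
--     sorter = sorted(predicted, key=itemgetter(1))
--     grouper = groupby(sorter, key=itemgetter(1))
--
--     res = {k: list(map(itemgetter(0), v)) for k, v in grouper}
--     final_predicted = []
--     for key in res:
--         complete_list = list(itertools.chain.from_iterable(res[key]))
--         final_predicted.append(
--             sorted(complete_list, key=lambda t: t[1], reverse=True)[:5])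
--     return final_predicted
-- ===== SOURCE B (Python) =====
-- def merge_answer(predicted):
--     # One pass: concatenate each item's tuple list into its key's bucket,
--     # then emit the stable top-5 (score-descending) per key in sorted key order.
--     groups = {}
--     for toks, key in predicted:
--         groups.setdefault(key, []).extend(toks)
--     return [sorted(groups[k], key=lambda t: t[1], reverse=True)[:5]
--             for k in sorted(groups)]
-- ===== Notes on version B (the rewrite author's own statement) =====
-- stated objective: simpler
-- what changed: Replaces sort-then-groupby-then-chain with a single pass that extends a per-key bucket dict directly, then emits the stable top-5 per key in sorted-key order; no global sort of the input and no groupby/chain.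
import Mathlib
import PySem

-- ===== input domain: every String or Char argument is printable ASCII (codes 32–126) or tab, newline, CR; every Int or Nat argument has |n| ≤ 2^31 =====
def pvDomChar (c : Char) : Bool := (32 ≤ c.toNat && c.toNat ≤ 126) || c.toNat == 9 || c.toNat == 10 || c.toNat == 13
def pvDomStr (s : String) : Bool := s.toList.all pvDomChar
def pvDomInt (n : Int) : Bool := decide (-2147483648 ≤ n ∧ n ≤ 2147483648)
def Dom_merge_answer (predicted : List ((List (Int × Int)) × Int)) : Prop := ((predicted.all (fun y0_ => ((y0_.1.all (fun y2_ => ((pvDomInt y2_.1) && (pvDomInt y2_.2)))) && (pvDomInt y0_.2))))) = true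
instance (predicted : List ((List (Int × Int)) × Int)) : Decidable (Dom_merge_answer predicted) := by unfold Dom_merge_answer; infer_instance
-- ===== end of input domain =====

-- B replaces A's sort+groupby+chain pipeline with a one-pass bucket dict per key
-- (extended in place), emitted in sorted-key order: simpler, same results.

-- ===== PORT A =====
-- itertools.groupby(sorter, key=itemgetter(1)) composed with map(itemgetter(0), v):
-- consecutive runs of equal second components; each group keeps the first components.
def pyGroupBySnd : List ((List (Int × Int)) × Int) → List (Int × List (List (Int × Int)))
  | [] => []
  | x :: xs =>
    (x.2, x.1 :: (xs.takeWhile (fun y => y.2 == x.2)).map (·.1)) ::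
      pyGroupBySnd (xs.dropWhile (fun y => y.2 == x.2))
  termination_by l => l.length
  decreasing_by
    simpa using Nat.lt_succ_of_le (List.length_dropWhile_le _ _)

-- A: sort by key, groupby, dict comprehension (keys of groupby on a sorted list are
-- distinct, so the dict is faithfully this association list), then the append loop.
def merge_answer (predicted : List ((List (Int × Int)) × Int)) : List (List (Int × Int)) :=
  let sorter := PySem.List.sorted predicted (fun p => p.2) false
  let res := pyGroupBySnd sorter
  res.foldl (fun acc kv =>
    acc ++ [PySem.List.slice
      (PySem.List.sorted (kv.2.flatMap (fun l => l)) (fun t => t.2) true)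
      none (some 5)]) []

-- ===== PORT B =====
-- B: groups.setdefault(key, []).extend(toks) is d.modify key [] (· ++ toks);
-- then the comprehension over sorted(groups) with groups[k] lookups.
def merge_answer_alt (predicted : List ((List (Int × Int)) × Int)) : List (List (Int × Int)) :=
  let groups := predicted.foldl
    (fun d p => d.modify p.2 ([] : List (Int × Int)) (· ++ p.1)) PySem.Dict.empty
  (PySem.List.sorted groups.keys (fun k => k) false).map
    (fun k => PySem.List.slice
      (PySem.List.sorted (groups.getD k []) (fun t => t.2) true)
      none (some 5))

-- ===== PRECONDITION & SPEC =====
def Spec_merge_answer (predicted : List ((List (Int × Int)) × Int)) (out : List (List (Int × Int))) : Prop := out = merge_answer_alt predicted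
instance (predicted : List ((List (Int × Int)) × Int)) (out : List (List (Int × Int))) : Decidable (Spec_merge_answer predicted out) := by unfold Spec_merge_answer; infer_instance

-- ===== CLAIM (what is proved, stated in full; the proofs are below) =====
def Claim_equal_merge_answer : Prop := ∀ (predicted : List ((List (Int × Int)) × Int)), Dom_merge_answer predicted → Spec_merge_answer predicted (merge_answer predicted)

-- ===== LEMMAS AND PROOFS =====

def pvGather (l : List ((List (Int × Int)) × Int)) (k : Int) : List (Int × Int) :=
  (l.filter (fun p => p.2 == k)).flatMap (·.1)

theorem pv_bucket_getD (l : List ((List (Int × Int)) × Int))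
    (d : PySem.Dict Int (List (Int × Int))) (k : Int) :
    (l.foldl (fun d p => d.modify p.2 ([] : List (Int × Int)) (· ++ p.1)) d).getD k []
      = d.getD k [] ++ pvGather l k := by
  induction l generalizing d with
  | nil => simp [pvGather]
  | cons p l ih =>
    simp only [List.foldl_cons, ih, pvGather, List.filter_cons]
    rw [PySem.Dict.getD_modify]
    by_cases hk : k = p.2
    · simp [hk]
    · simp [hk, Ne.symm hk]

theorem pv_bucket_keys (l : List ((List (Int × Int)) × Int)) :
    (l.foldl (fun d p => d.modify p.2 ([] : List (Int × Int)) (· ++ p.1))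
      (PySem.Dict.empty : PySem.Dict Int (List (Int × Int)))).keys
      = PySem.Set.ofList (l.map (·.2)) := by
  rw [PySem.Dict.keys_foldl_modify_key l (·.2) ([] : List (Int × Int))
    (fun _ p v => v ++ p.1)]
  rfl

theorem pv_foldl_add_cons (l : List Int) (s : List Int) (a : Int) (ha : a ∉ l) :
    List.foldl PySem.Set.add (a :: s) l = a :: List.foldl PySem.Set.add s l := by
  induction l generalizing s with
  | nil => rfl
  | cons b l ih =>
    have hb : a ≠ b := fun h => ha (h ▸ List.mem_cons_self)
    have : PySem.Set.add (a :: s) b = a :: PySem.Set.add s b := by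
      have hba : (b == a) = false := by simpa using Ne.symm hb
      simp only [PySem.Set.add, PySem.Set.contains, List.contains_cons, hba,
        Bool.false_or]
      split <;> rfl
    simp only [List.foldl_cons, this, ih _ (fun h => ha (List.mem_cons_of_mem _ h))]

theorem pv_foldl_add_mem (l : List Int) (s : List Int) (h : ∀ y ∈ l, y ∈ s) :
    List.foldl PySem.Set.add s l = s := by
  induction l with
  | nil => rfl
  | cons b l ih =>
    have : PySem.Set.add s b = s := by
      simp [PySem.Set.add, PySem.Set.contains]
      exact h b List.mem_cons_self
    simp only [List.foldl_cons, this]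
    exact ih (fun y hy => h y (List.mem_cons_of_mem _ hy))

theorem pv_foldl_add_sublist (l : List Int) (s : List Int) :
    ∃ t, List.foldl PySem.Set.add s l = s ++ t ∧ t.Sublist l := by
  induction l generalizing s with
  | nil => exact ⟨[], by simp⟩
  | cons b l ih =>
    simp only [List.foldl_cons]
    by_cases hc : b ∈ s
    · have : PySem.Set.add s b = s := by simp [PySem.Set.add, PySem.Set.contains, hc]
      rw [this]
      obtain ⟨t, ht, hs⟩ := ih s
      exact ⟨t, ht, hs.cons b⟩
    · have : PySem.Set.add s b = s ++ [b] := by simp [PySem.Set.add, PySem.Set.contains, hc]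
      rw [this]
      obtain ⟨t, ht, hs⟩ := ih (s ++ [b])
      exact ⟨b :: t, by simpa using ht, hs.cons₂ b⟩

theorem pv_filter_insertBy (k : Int) (x : (List (Int × Int)) × Int)
    (ys : List ((List (Int × Int)) × Int))
    (h : ys.Pairwise (fun a b => a.2 ≤ b.2)) :
    (PySem.List.insertBy (fun a b => decide (a.2 < b.2)) x ys).filter (fun y => y.2 == k)
      = if x.2 == k then ys.filter (fun y => y.2 == k) ++ [x]
        else ys.filter (fun y => y.2 == k) := by
  induction ys with
  | nil =>
    simp only [PySem.List.insertBy, List.filter_nil, List.nil_append]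
    split <;> simp_all
  | cons y ys ih =>
    rw [show PySem.List.insertBy (fun a b => decide (a.2 < b.2)) x (y :: ys)
        = if decide (x.2 < y.2) then x :: y :: ys
          else y :: PySem.List.insertBy (fun a b => decide (a.2 < b.2)) x ys from rfl]
    by_cases hxy : x.2 < y.2
    · simp only [hxy, decide_true, if_true]
      by_cases hxk : x.2 = k
      · have hnil : (y :: ys).filter (fun y => y.2 == k) = [] := by
          rw [List.filter_eq_nil_iff]
          intro z hz
        -- every element of y :: ys has key > x.2 = k
          have hlt : x.2 < z.2 := by
            rcases List.mem_cons.mp hz with rfl | hz'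
            · exact hxy
            · exact lt_of_lt_of_le hxy ((List.pairwise_cons.mp h).1 z hz')
          simp only [beq_iff_eq]
          omega
        simp [hnil, hxk]
      · have : (x.2 == k) = false := by simpa using hxk
        simp [List.filter_cons, this]
    · have hd : decide (x.2 < y.2) = false := by simpa using hxy
      rw [hd]
      simp only [Bool.false_eq_true, if_false, List.filter_cons,
        ih (List.pairwise_cons.mp h).2]
      split_ifs <;> simp
theorem pv_filter_sorted (l : List ((List (Int × Int)) × Int)) (k : Int) :
    (PySem.List.sorted l (fun p => p.2) false).filter (fun y => y.2 == k)
      = l.filter (fun y => y.2 == k) := by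
  induction l using List.reverseRecOn with
  | nil => rfl
  | append_singleton l x ih =>
    have hs : PySem.List.sorted (l ++ [x]) (fun p => p.2) false
        = PySem.List.insertBy (fun a b => decide (a.2 < b.2)) x
            (PySem.List.sorted l (fun p => p.2) false) := by
      rw [PySem.List.sorted_eq_foldl_insertBy, PySem.List.sorted_eq_foldl_insertBy,
        List.foldl_append]
      rfl
    rw [hs, pv_filter_insertBy k x _ (PySem.List.sorted_pairwise l (fun p => p.2)),
      List.filter_append, ih]
    split_ifs with hxk <;> simp [hxk]

theorem pv_dropWhile_head_false {α : Type} (p : α → Bool) (l : List α)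
    (hd : α) (tl : List α) (h : List.dropWhile p l = hd :: tl) : p hd = false := by
  induction l with
  | nil => simp at h
  | cons a l ih =>
    rw [List.dropWhile_cons] at h
    by_cases hp : p a
    · exact ih (by simpa [hp] using h)
    · have : a = hd := by simpa [hp] using congrArg (·.head?) h
      simpa [← this] using hp

theorem pv_groupBy_spec (s : List ((List (Int × Int)) × Int))
    (h : s.Pairwise (fun a b => a.2 ≤ b.2)) :
    pyGroupBySnd s = (PySem.Set.ofList (s.map (·.2))).map
      (fun k => (k, (s.filter (fun y => y.2 == k)).map (·.1))) := by
  induction s using pyGroupBySnd.induct with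
  | case1 => rw [pyGroupBySnd]; rfl
  | case2 x xs ih =>
    set g := xs.takeWhile (fun y => y.2 == x.2) with hgdef
    set r := xs.dropWhile (fun y => y.2 == x.2) with hrdef
    have hgr : g ++ r = xs := List.takeWhile_append_dropWhile
    have hx : ∀ z ∈ xs, x.2 ≤ z.2 := (List.pairwise_cons.mp h).1
    have hxs : xs.Pairwise (fun a b => a.2 ≤ b.2) := (List.pairwise_cons.mp h).2
    have hg : ∀ y ∈ g, y.2 = x.2 := fun y hy => by
      simpa using List.mem_takeWhile_imp hy
    have hrp : r.Pairwise (fun a b => a.2 ≤ b.2) :=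
      List.Pairwise.sublist (List.dropWhile_sublist _) hxs
    have hr : ∀ y ∈ r, x.2 < y.2 := by
      cases hcr : r with
      | nil => simp
      | cons hd tl =>
        have hhd : (hd.2 == x.2) = false :=
          pv_dropWhile_head_false _ xs hd tl (hrdef ▸ hcr)
        have hdmem : hd ∈ xs := List.Sublist.mem (by rw [hcr]; exact List.mem_cons_self) (hrdef ▸ List.dropWhile_sublist _)
        have hxhd : x.2 < hd.2 :=
          lt_of_le_of_ne (hx hd hdmem) (by intro he; simp [← he] at hhd)
        intro y hy
        have hrp' : (hd :: tl).Pairwise (fun a b => a.2 ≤ b.2) := hcr ▸ hrp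
        rcases List.mem_cons.mp hy with rfl | hy'
        · exact hxhd
        · exact lt_of_lt_of_le hxhd ((List.pairwise_cons.mp hrp').1 y hy')
    -- the distinct keys of x :: xs
    have hkeys : PySem.Set.ofList ((x :: xs).map (·.2))
        = x.2 :: PySem.Set.ofList (r.map (·.2)) := by
      have h1 : PySem.Set.ofList ((x :: xs).map (·.2))
          = List.foldl PySem.Set.add [x.2] ((g.map (·.2)) ++ (r.map (·.2))) := by
        rw [show (x :: xs).map (·.2) = x.2 :: (g.map (·.2) ++ r.map (·.2)) by
          rw [← List.map_append, hgr]; rfl]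
        rfl
      rw [h1, List.foldl_append,
        pv_foldl_add_mem (g.map (·.2)) [x.2] (by
          intro y hy
          rcases List.mem_map.mp hy with ⟨z, hz, rfl⟩
          simp [hg z hz]),
        pv_foldl_add_cons (r.map (·.2)) [] x.2 (by
          intro hmem
          rcases List.mem_map.mp hmem with ⟨z, hz, hzz⟩
          exact absurd hzz.symm (hr z hz).ne)]
      rfl
    -- unfold one step of pyGroupBySnd
    rw [show pyGroupBySnd (x :: xs)
        = (x.2, x.1 :: g.map (·.1)) :: pyGroupBySnd r from by rw [pyGroupBySnd]]
    rw [hkeys, List.map_cons]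
    congr 1
    · -- head group: filter of x :: xs at key x.2
      have hfil : (x :: xs).filter (fun y => y.2 == x.2) = x :: g := by
        rw [List.filter_cons_of_pos (by simp), ← hgr, List.filter_append,
          List.filter_eq_self.mpr (fun y hy => by simp [hg y hy]),
          List.filter_eq_nil_iff.mpr (fun y hy => by simp [ne_of_gt (hr y hy)]),
          List.append_nil]
      rw [hfil]; rfl
    · -- tail groups
      rw [ih hrp]
      apply List.map_congr_left
      intro k hk
      have hkr : k ∈ r.map (·.2) := by
        have := PySem.Set.mem_ofList (r.map (·.2)) k
        exact this.mp hk
      rcases List.mem_map.mp hkr with ⟨z, hz, rfl⟩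
      have hkx : x.2 < z.2 := hr z hz
      have hfil : (x :: xs).filter (fun y => y.2 == z.2) = r.filter (fun y => y.2 == z.2) := by
        rw [List.filter_cons_of_neg (by simp [ne_of_lt hkx]), ← hgr, List.filter_append,
          List.filter_eq_nil_iff.mpr (fun y hy => by
            simp [hg y hy, ne_of_lt hkx]),
          List.nil_append]
      rw [hfil]

theorem pv_keys_eq (predicted : List ((List (Int × Int)) × Int)) :
    PySem.List.sorted (PySem.Set.ofList (predicted.map (·.2))) (fun k => k) false
      = PySem.Set.ofList ((PySem.List.sorted predicted (fun p => p.2) false).map (·.2)) := by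
  apply PySem.List.sorted_eq_of_perm_of_pairwise_lt
  · refine (List.perm_ext_iff_of_nodup (PySem.Set.nodup_ofList _) (PySem.Set.nodup_ofList _)).mpr ?_
    intro a
    rw [PySem.Set.mem_ofList, PySem.Set.mem_ofList]
    exact ((PySem.List.sorted_perm predicted (fun p => p.2) false).map (·.2)).mem_iff
  · have hsub : (PySem.Set.ofList ((PySem.List.sorted predicted (fun p => p.2) false).map (·.2))).Sublist
        ((PySem.List.sorted predicted (fun p => p.2) false).map (·.2)) := by
      obtain ⟨t, ht, hs⟩ := pv_foldl_add_sublist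
        ((PySem.List.sorted predicted (fun p => p.2) false).map (·.2)) []
      have : PySem.Set.ofList ((PySem.List.sorted predicted (fun p => p.2) false).map (·.2)) = t := by
        rw [show PySem.Set.ofList ((PySem.List.sorted predicted (fun p => p.2) false).map (·.2))
          = List.foldl PySem.Set.add [] ((PySem.List.sorted predicted (fun p => p.2) false).map (·.2)) from rfl, ht]
        simp
      rw [this]; exact hs
    have hle : (PySem.Set.ofList ((PySem.List.sorted predicted (fun p => p.2) false).map (·.2))).Pairwise (· ≤ ·) :=
      List.Pairwise.sublist hsub (PySem.List.sorted_map_key_pairwise predicted (fun p => p.2))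
    have hne : (PySem.Set.ofList ((PySem.List.sorted predicted (fun p => p.2) false).map (·.2))).Pairwise (· ≠ ·) :=
      PySem.Set.nodup_ofList _
    exact (hle.and hne).imp (fun h => lt_of_le_of_ne h.1 h.2)

theorem merge_answer_eq (predicted : List ((List (Int × Int)) × Int)) :
    merge_answer predicted = merge_answer_alt predicted := by
  simp only [merge_answer, merge_answer_alt]
  rw [PySem.List.foldl_append_singleton_eq_map]
  rw [pv_groupBy_spec _ (PySem.List.sorted_pairwise predicted (fun p => p.2)),
    pv_bucket_keys, pv_keys_eq]
  simp only [pv_bucket_getD, PySem.Dict.getD_empty, List.nil_append, List.map_map]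
  apply List.map_congr_left
  intro k _
  simp only [Function.comp]
  rw [List.flatMap_map]
  rw [show (fun a => a.1) = fun (a : (List (Int × Int)) × Int) => a.1 from rfl]
  rw [pv_filter_sorted]
  rfl

-- ===== VERDICT (by name: the statement is the Claim_ definition above) =====
theorem merge_answer_spec : Claim_equal_merge_answer := by
  intro predicted _
  unfold Spec_merge_answer
  exact merge_answer_eq predicted
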